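-- pv_equiv track=rewrite | github.com/ai2050lin/Ai2050-UniOne | tests/glm5/cclv_phase16_attn_syntax.py | find_token_index
-- ===== SOURCE A (Python) =====
-- def find_token_index(tokens, word):
--     word_lower = word.lower()
--     word_start = word_lower[:3]
--     for i, tok in enumerate(tokens):
--         tok_lower = tok.lower().strip()
--         if word_lower in tok_lower or tok_lower.startswith(word_start):
--             return i
--     for i, tok in enumerate(tokens):
--         if word_lower[:2] in tok.lower():
--             return i
--     return None
-- ===== SOURCE B (Python) =====
-- def find_token_index(tokens, word):
--     word_lower = word.lower()
--     word_start = word_lower[:3]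
--     word_pre2 = word_lower[:2]
--     fallback = None
--     for i, tok in enumerate(tokens):
--         tok_low = tok.lower()
--         tok_stripped = tok_low.strip()
--         if word_lower in tok_stripped or tok_stripped.startswith(word_start):
--             return i
--         if fallback is None and word_pre2 in tok_low:
--             fallback = i
--     return fallback
-- ===== Notes on version B (the rewrite author's own statement) =====
-- stated objective: alternative
-- what changed: A's two sequential scans (primary match, then secondary two-char fallback scan) are collapsed into one pass over enumerate(tokens) that carries the first secondary-match index forward in a `fallback` variable.
import Mathlib
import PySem

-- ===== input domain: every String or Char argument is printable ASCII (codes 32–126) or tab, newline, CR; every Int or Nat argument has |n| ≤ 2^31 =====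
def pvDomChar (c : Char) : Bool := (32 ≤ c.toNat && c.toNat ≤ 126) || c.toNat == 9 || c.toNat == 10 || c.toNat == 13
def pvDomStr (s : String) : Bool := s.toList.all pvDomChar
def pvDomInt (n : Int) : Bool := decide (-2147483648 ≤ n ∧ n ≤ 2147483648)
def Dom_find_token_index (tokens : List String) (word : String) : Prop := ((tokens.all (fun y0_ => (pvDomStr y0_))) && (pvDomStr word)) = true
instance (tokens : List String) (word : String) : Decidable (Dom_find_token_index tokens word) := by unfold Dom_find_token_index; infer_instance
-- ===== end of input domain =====

-- B merges A's two sequential scans into one pass carrying a `fallback` index; return value only.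

-- ===== PORT A =====
-- first loop of A: primary match (substring of stripped lowered token, or prefix word_start)
def ftiLoop1 (word_lower word_start : String) : List String → Int → Option Int
  | [], _ => none
  | tok :: rest, i =>
    let tok_lower := PySem.Str.strip (PySem.Str.lower tok)
    if PySem.Str.isIn word_lower tok_lower || PySem.Str.startswith tok_lower word_start then
      some i
    else ftiLoop1 word_lower word_start rest (i + 1)

-- second loop of A: word_lower[:2] in tok.lower()
def ftiLoop2 (word_lower : String) : List String → Int → Option Int
  | [], _ => none
  | tok :: rest, i =>
    if PySem.Str.isIn (PySem.Str.slice word_lower none (some 2)) (PySem.Str.lower tok) then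
      some i
    else ftiLoop2 word_lower rest (i + 1)

def find_token_index (tokens : List String) (word : String) : Option Int :=
  let word_lower := PySem.Str.lower word
  let word_start := PySem.Str.slice word_lower none (some 3)
  match ftiLoop1 word_lower word_start tokens 0 with
  | some i => some i
  | none => ftiLoop2 word_lower tokens 0

-- ===== PORT B =====
-- single pass: return immediately on primary match, carry the first secondary match as `fallback`
def ftiAltLoop (word_lower word_start word_pre2 : String) :
    List String → Int → Option Int → Option Int
  | [], _, fallback => fallback
  | tok :: rest, i, fallback =>
    let tok_low := PySem.Str.lower tok
    let tok_stripped := PySem.Str.strip tok_low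
    if PySem.Str.isIn word_lower tok_stripped || PySem.Str.startswith tok_stripped word_start then
      some i
    else
      let fallback' := if fallback.isNone && PySem.Str.isIn word_pre2 tok_low then some i else fallback
      ftiAltLoop word_lower word_start word_pre2 rest (i + 1) fallback'

def find_token_index_alt (tokens : List String) (word : String) : Option Int :=
  let word_lower := PySem.Str.lower word
  let word_start := PySem.Str.slice word_lower none (some 3)
  let word_pre2 := PySem.Str.slice word_lower none (some 2)
  ftiAltLoop word_lower word_start word_pre2 tokens 0 none

-- ===== PRECONDITION & SPEC =====
def Spec_find_token_index (tokens : List String) (word : String) (out : Option Int) : Prop := out = find_token_index_alt tokens word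
instance (tokens : List String) (word : String) (out : Option Int) : Decidable (Spec_find_token_index tokens word out) := by unfold Spec_find_token_index; infer_instance

-- ===== CLAIM (what is proved, stated in full; the proofs are below) =====
def Claim_equal_find_token_index : Prop := ∀ (tokens : List String) (word : String), Dom_find_token_index tokens word → Spec_find_token_index tokens word (find_token_index tokens word)

-- ===== LEMMAS AND PROOFS =====

-- proof helper: A's second loop with the two-char prefix precomputed
def ftiSecondary (p2 : String) : List String → Int → Option Int
  | [], _ => none
  | tok :: rest, i =>
    if PySem.Str.isIn p2 (PySem.Str.lower tok) then some i
    else ftiSecondary p2 rest (i + 1)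

-- the one-pass loop equals: first primary match, else fallback, else first secondary match
theorem ftiAltLoop_eq (wl ws p2 : String) (ts : List String) (i : Int) (fb : Option Int) :
    ftiAltLoop wl ws p2 ts i fb =
      match ftiLoop1 wl ws ts i with
      | some j => some j
      | none => match fb with
                | some v => some v
                | none => ftiSecondary p2 ts i := by
  induction ts generalizing i fb with
  | nil => cases fb <;> simp [ftiAltLoop, ftiLoop1, ftiSecondary]
  | cons tok rest ih =>
    simp only [ftiAltLoop, ftiLoop1, ftiSecondary]
    generalize (PySem.Str.isIn wl (PySem.Str.strip (PySem.Str.lower tok)) ||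
        PySem.Str.startswith (PySem.Str.strip (PySem.Str.lower tok)) ws) = cp
    generalize PySem.Str.isIn p2 (PySem.Str.lower tok) = cs
    cases cp with
    | true => simp
    | false =>
      simp only [Bool.false_eq_true, if_false]
      rw [ih]
      cases fb with
      | some v => simp
      | none =>
        cases cs with
        | true =>
          simp only [Option.isNone_none, Bool.true_and, if_true]
        | false =>
          simp only [Option.isNone_none, Bool.true_and, Bool.false_eq_true, if_false]

-- ftiLoop2 with the slice precomputed (B computes word_lower[:2] once)
theorem ftiSecondary_eq (wl : String) (ts : List String) (i : Int) :
    ftiSecondary (PySem.Str.slice wl none (some 2)) ts i = ftiLoop2 wl ts i := by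
  induction ts generalizing i with
  | nil => simp [ftiLoop2, ftiSecondary]
  | cons tok rest ih => simp only [ftiLoop2, ftiSecondary]; split_ifs <;> simp [ih]


-- ===== VERDICT (by name: the statement is the Claim_ definition above) =====
theorem find_token_index_spec : Claim_equal_find_token_index := by
  intro tokens word _
  unfold Spec_find_token_index find_token_index find_token_index_alt
  rw [ftiAltLoop_eq, ftiSecondary_eq]
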